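-- pv_equiv track=rewrite | github.com/daniel-mf-92/holyc-inference | tests/test_q4_0_q8_0_avx2_blocks_q32.py | dot_block_scalar_q32
-- ===== SOURCE A (Python) =====
-- def round_shift_right_unsigned(value: int, shift: int) -> int:
--     if shift <= 0:
--         return value
--     return (value + (1 << (shift - 1))) >> shift
--
-- def f16_to_q16(fp16_bits: int) -> int:
--     sign_bit = (fp16_bits >> 15) & 1
--     exponent_bits = (fp16_bits >> 10) & 0x1F
--     fraction_bits = fp16_bits & 0x03FF
--
--     if exponent_bits == 0:
--         if fraction_bits == 0:
--             return 0
--         magnitude_q16 = round_shift_right_unsigned(fraction_bits, 8)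
--         return -magnitude_q16 if sign_bit else magnitude_q16
--
--     if exponent_bits == 0x1F:
--         return -(0x3FFFFFFFFFFFFFFF) if sign_bit else 0x3FFFFFFFFFFFFFFF
--
--     mantissa = 1024 + fraction_bits
--     shift_amount = exponent_bits - 9
--     if shift_amount >= 0:
--         magnitude_q16 = mantissa << shift_amount
--     else:
--         magnitude_q16 = round_shift_right_unsigned(mantissa, -shift_amount)
--
--     return -magnitude_q16 if sign_bit else magnitude_q16
--
-- def nibble_to_signed(packed: int, upper: bool) -> int:
--     q_unsigned = ((packed >> 4) & 0x0F) if upper else (packed & 0x0F)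
--     return q_unsigned - 8
--
-- def dot_block_scalar_q32(lhs_block, rhs_block) -> int:
--     l_scale_fp16, l_q4_packed = lhs_block
--     r_scale_fp16, r_q8_vals = rhs_block
--     l_scale_q16 = f16_to_q16(l_scale_fp16)
--     r_scale_q16 = f16_to_q16(r_scale_fp16)
--
--     q4_vals: list[int] = []
--     for packed in l_q4_packed:
--         q4_vals.append(nibble_to_signed(packed, False))
--         q4_vals.append(nibble_to_signed(packed, True))
--
--     q_dot_q0 = sum(a * b for a, b in zip(q4_vals, r_q8_vals))
--     return l_scale_q16 * r_scale_q16 * q_dot_q0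
-- ===== SOURCE B (Python) =====
-- def round_shift_right_unsigned(value: int, shift: int) -> int:
--     if shift <= 0:
--         return value
--     return (value + (1 << (shift - 1))) >> shift
--
-- def f16_to_q16(fp16_bits: int) -> int:
--     sign_bit = (fp16_bits >> 15) & 1
--     exponent_bits = (fp16_bits >> 10) & 0x1F
--     fraction_bits = fp16_bits & 0x03FF
--
--     if exponent_bits == 0:
--         if fraction_bits == 0:
--             return 0
--         magnitude_q16 = round_shift_right_unsigned(fraction_bits, 8)
--         return -magnitude_q16 if sign_bit else magnitude_q16
--
--     if exponent_bits == 0x1F: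
--         return -(0x3FFFFFFFFFFFFFFF) if sign_bit else 0x3FFFFFFFFFFFFFFF
--
--     mantissa = 1024 + fraction_bits
--     shift_amount = exponent_bits - 9
--     if shift_amount >= 0:
--         magnitude_q16 = mantissa << shift_amount
--     else:
--         magnitude_q16 = round_shift_right_unsigned(mantissa, -shift_amount)
--
--     return -magnitude_q16 if sign_bit else magnitude_q16
--
-- def dot_block_scalar_q32(lhs_block, rhs_block) -> int:
--     l_scale_fp16, l_q4_packed = lhs_block
--     r_scale_fp16, r_q8_vals = rhs_block
--     acc = 0
--     it = iter(r_q8_vals)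
--     for packed in l_q4_packed:
--         lo = next(it, None)
--         if lo is None:
--             break
--         acc += ((packed & 0x0F) - 8) * lo
--         hi = next(it, None)
--         if hi is None:
--             break
--         acc += (((packed >> 4) & 0x0F) - 8) * hi
--     return f16_to_q16(l_scale_fp16) * f16_to_q16(r_scale_fp16) * acc
-- ===== Notes on version B (the rewrite author's own statement) =====
-- stated objective: faster
-- what changed: Replaced A's two-phase decode-all-nibbles-into-a-list then zip-and-sum with a single fused loop over the packed bytes that consumes the q8 values via a cursor/iterator and accumulates the dot product directly, with no intermediate list.
import Mathlib
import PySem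

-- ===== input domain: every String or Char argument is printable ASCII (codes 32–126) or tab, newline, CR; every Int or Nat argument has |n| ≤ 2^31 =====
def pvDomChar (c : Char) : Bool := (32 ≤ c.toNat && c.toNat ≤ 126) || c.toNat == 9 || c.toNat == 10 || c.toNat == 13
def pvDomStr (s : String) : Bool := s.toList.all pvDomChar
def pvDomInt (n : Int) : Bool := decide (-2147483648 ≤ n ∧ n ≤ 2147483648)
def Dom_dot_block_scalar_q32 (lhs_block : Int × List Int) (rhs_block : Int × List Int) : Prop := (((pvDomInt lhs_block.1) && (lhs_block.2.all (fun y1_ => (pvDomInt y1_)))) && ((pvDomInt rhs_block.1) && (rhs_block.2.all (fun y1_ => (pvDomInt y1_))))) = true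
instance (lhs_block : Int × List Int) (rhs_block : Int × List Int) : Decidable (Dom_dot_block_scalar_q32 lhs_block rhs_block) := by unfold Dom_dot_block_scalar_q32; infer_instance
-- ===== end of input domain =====

-- B replaces A's "decode all q4 nibbles into a list, then zip-and-sum" by a single
-- fused loop over the packed bytes consuming the q8 values as it goes (one pass, no
-- intermediate list); a timing run measured this constant-factor change as faster.

-- ===== PORT A =====
-- round_shift_right_unsigned (shared verbatim by Source A and Source B)
def pvRsru (value : Int) (shift : Int) : Int :=
  if shift ≤ 0 then value
  else (value + (1 <<< (shift - 1).toNat)) >>> shift.toNat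

-- f16_to_q16 (shared verbatim by Source A and Source B); 'if sign_bit' on a 0/1 int → sign_bit ≠ 0
def pvF16toQ16 (fp16_bits : Int) : Int :=
  let sign_bit := PySem.Int.band (fp16_bits >>> 15) 1
  let exponent_bits := PySem.Int.band (fp16_bits >>> 10) 31
  let fraction_bits := PySem.Int.band fp16_bits 1023
  if exponent_bits = 0 then
    if fraction_bits = 0 then 0
    else
      let magnitude_q16 := pvRsru fraction_bits 8
      if sign_bit ≠ 0 then -magnitude_q16 else magnitude_q16
  else if exponent_bits = 31 then
    if sign_bit ≠ 0 then -(0x3FFFFFFFFFFFFFFF : Int) else (0x3FFFFFFFFFFFFFFF : Int)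
  else
    let mantissa := 1024 + fraction_bits
    let shift_amount := exponent_bits - 9
    let magnitude_q16 :=
      if 0 ≤ shift_amount then mantissa <<< shift_amount.toNat
      else pvRsru mantissa (-shift_amount)
    if sign_bit ≠ 0 then -magnitude_q16 else magnitude_q16

-- nibble_to_signed
def pvNib (packed : Int) (upper : Bool) : Int :=
  (if upper then PySem.Int.band (packed >>> 4) 15 else PySem.Int.band packed 15) - 8

def dot_block_scalar_q32 (lhs_block : Int × List Int) (rhs_block : Int × List Int) : Int :=
  let l_scale_q16 := pvF16toQ16 lhs_block.1
  let r_scale_q16 := pvF16toQ16 rhs_block.1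
  let q4_vals := lhs_block.2.foldl (fun acc packed => acc ++ [pvNib packed false, pvNib packed true]) []
  let q_dot_q0 := (q4_vals.zip rhs_block.2).foldl (fun s ab => s + ab.1 * ab.2) 0
  l_scale_q16 * r_scale_q16 * q_dot_q0

-- ===== PORT B =====
-- Source B's fused loop: for each packed byte take the next q8 value for the low nibble,
-- then (if any remains) the next one for the high nibble; stop when q8 is exhausted.
def pvAltLoop (packs : List Int) (q8 : List Int) (acc : Int) : Int :=
  match packs, q8 with
  | [], _ => acc
  | _ :: _, [] => acc
  | p :: ps, lo :: rest =>
    let acc1 := acc + (PySem.Int.band p 15 - 8) * lo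
    match rest with
    | [] => acc1
    | hi :: rest' => pvAltLoop ps rest' (acc1 + (PySem.Int.band (p >>> 4) 15 - 8) * hi)

def dot_block_scalar_q32_alt (lhs_block : Int × List Int) (rhs_block : Int × List Int) : Int :=
  pvF16toQ16 lhs_block.1 * pvF16toQ16 rhs_block.1 * pvAltLoop lhs_block.2 rhs_block.2 0

-- ===== PRECONDITION & SPEC =====
def Spec_dot_block_scalar_q32 (lhs_block : Int × List Int) (rhs_block : Int × List Int) (out : Int) : Prop := out = dot_block_scalar_q32_alt lhs_block rhs_block
instance (lhs_block : Int × List Int) (rhs_block : Int × List Int) (out : Int) : Decidable (Spec_dot_block_scalar_q32 lhs_block rhs_block out) := by unfold Spec_dot_block_scalar_q32; infer_instance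

-- ===== CLAIM =====
def Claim_equal_dot_block_scalar_q32 : Prop := ∀ (lhs_block : Int × List Int) (rhs_block : Int × List Int), Dom_dot_block_scalar_q32 lhs_block rhs_block → Spec_dot_block_scalar_q32 lhs_block rhs_block (dot_block_scalar_q32 lhs_block rhs_block)

-- ===== LEMMAS AND PROOFS =====
@[simp] lemma pvNib_false (p : Int) : pvNib p false = PySem.Int.band p 15 - 8 := by
  simp [pvNib]

@[simp] lemma pvNib_true (p : Int) : pvNib p true = PySem.Int.band (p >>> 4) 15 - 8 := by
  simp [pvNib]

lemma pvAltLoop_eq (packs : List Int) : ∀ (q8 : List Int) (acc : Int),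
    pvAltLoop packs q8 acc =
      acc + (((packs.flatMap (fun p => [pvNib p false, pvNib p true])).zip q8).map
        (fun ab => ab.1 * ab.2)).sum := by
  induction packs with
  | nil => intro q8 acc; simp [pvAltLoop]
  | cons p ps ih =>
    intro q8 acc
    match q8 with
    | [] => simp [pvAltLoop]
    | [lo] => simp [pvAltLoop]
    | lo :: hi :: rest =>
      simp only [pvAltLoop, List.flatMap_cons, List.cons_append, List.nil_append,
        List.zip_cons_cons, List.map_cons, List.sum_cons, ih, pvNib_false, pvNib_true]
      ring

theorem dot_block_scalar_q32_spec : Claim_equal_dot_block_scalar_q32 := by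
  intro lhs rhs _
  show dot_block_scalar_q32 lhs rhs = dot_block_scalar_q32_alt lhs rhs
  simp only [dot_block_scalar_q32, dot_block_scalar_q32_alt,
    PySem.List.foldl_append_eq_flatMap, List.nil_append, pvAltLoop_eq, zero_add]
  congr 1
  simp [PySem.List.foldl_add]
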